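-- pv_equiv track=rewrite | github.com/Yaso-cyber/ai-cloud-grc | backend/policy_engine/evaluator.py | framework_summary
-- ===== SOURCE A (Python) =====
-- from typing import Any
--
-- def framework_summary(evaluated_findings: list[dict[str, Any]]) -> dict[str, list[str]]:
--     """Return a map of framework → list of failing control IDs."""
--     summary: dict[str, list[str]] = {}
--     for f in evaluated_findings:
--         for framework, controls in f.get("framework_refs", {}).items():
--             summary.setdefault(framework, [])
--             for ctrl in controls:
--                 if ctrl not in summary[framework]:
--                     summary[framework].append(ctrl)
--     return summary
-- ===== SOURCE B (Python) =====
-- from typing import Any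
--
-- def framework_summary(evaluated_findings: list[dict[str, Any]]) -> dict[str, list[str]]:
--     """Return a map of framework -> list of failing control IDs."""
--     # Flatten everything into ordered streams, then dedupe and group.
--     fw_order = list(dict.fromkeys(
--         fw for f in evaluated_findings for fw in f.get("framework_refs", {})))
--     pairs = [(fw, c)
--              for f in evaluated_findings
--              for fw, ctrls in f.get("framework_refs", {}).items()
--              for c in ctrls]
--     uniq = list(dict.fromkeys(pairs))
--     return {fw: [c for g, c in uniq if g == fw] for fw in fw_order}
-- ===== Notes on version B (the rewrite author's own statement) =====
-- stated objective: alternative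
-- what changed: B replaces A's incremental dict-of-lists build (setdefault plus an inline 'if ctrl not in' membership scan per control) by a flatten/dedupe/group pipeline: it flattens all findings into an ordered framework stream and an ordered (framework, control) pair stream, dedupes each once with dict.fromkeys, and groups the unique pairs by framework.
import Mathlib
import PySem

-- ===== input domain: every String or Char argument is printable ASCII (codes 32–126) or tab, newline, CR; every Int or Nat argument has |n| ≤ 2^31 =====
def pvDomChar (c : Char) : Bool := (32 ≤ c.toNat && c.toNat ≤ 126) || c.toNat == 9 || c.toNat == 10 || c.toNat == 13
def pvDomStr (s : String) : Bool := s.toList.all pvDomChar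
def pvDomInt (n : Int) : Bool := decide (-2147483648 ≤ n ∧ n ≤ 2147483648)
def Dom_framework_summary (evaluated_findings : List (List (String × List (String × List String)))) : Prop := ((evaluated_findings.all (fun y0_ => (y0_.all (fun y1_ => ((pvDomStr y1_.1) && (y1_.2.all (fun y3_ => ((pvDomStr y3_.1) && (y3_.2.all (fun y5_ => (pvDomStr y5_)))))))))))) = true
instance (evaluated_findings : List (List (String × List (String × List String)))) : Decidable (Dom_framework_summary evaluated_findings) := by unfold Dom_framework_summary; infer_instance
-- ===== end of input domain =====

-- B replaces A's incremental dict-of-lists build by a flatten/dedupe/group pipeline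
-- (ordered framework stream + ordered pair stream, deduped once, then grouped);
-- same return value (objective: alternative decomposition).

-- ===== PORT A =====
def framework_summary (evaluated_findings : List (List (String × List (String × List String)))) : List (String × List String) :=
  (evaluated_findings.foldl (fun (summary : PySem.Dict String (List String)) f =>
      ((PySem.Dict.mk f).getD "framework_refs" ([] : List (String × List String))).foldl
        (fun summary p =>
          let summary := PySem.Dict.setdefault summary p.1 []
          p.2.foldl (fun summary ctrl =>
            if (summary.getD p.1 []).contains ctrl then summary
            else summary.insert p.1 (summary.getD p.1 [] ++ [ctrl])) summary)
        summary)
    PySem.Dict.empty).items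

-- ===== PORT B =====
def framework_summary_alt (evaluated_findings : List (List (String × List (String × List String)))) : List (String × List String) :=
  let fw_order := PySem.List.dedup (evaluated_findings.flatMap (fun f =>
      ((PySem.Dict.mk f).getD "framework_refs" ([] : List (String × List String))).map Prod.fst))
  let pairs := evaluated_findings.flatMap (fun f =>
      ((PySem.Dict.mk f).getD "framework_refs" ([] : List (String × List String))).flatMap
        (fun p => p.2.map (fun c => (p.1, c))))
  let uniq := PySem.List.dedup pairs
  fw_order.map (fun fw => (fw, (uniq.filter (fun q => q.1 == fw)).map Prod.snd))

-- ===== PRECONDITION & SPEC =====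
def Spec_framework_summary (evaluated_findings : List (List (String × List (String × List String)))) (out : List (String × List String)) : Prop := out = framework_summary_alt evaluated_findings
instance (evaluated_findings : List (List (String × List (String × List String)))) (out : List (String × List String)) : Decidable (Spec_framework_summary evaluated_findings out) := by unfold Spec_framework_summary; infer_instance

-- ===== CLAIM (what is proved, stated in full; the proofs are below) =====
def Claim_equal_framework_summary : Prop := ∀ (evaluated_findings : List (List (String × List (String × List String)))), Dom_framework_summary evaluated_findings → Spec_framework_summary evaluated_findings (framework_summary evaluated_findings)

-- ===== LEMMAS AND PROOFS =====

-- a finding's "framework_refs" list, and the per-chunk steps of A and of B's collector model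
def frefs (f : List (String × List (String × List String))) : List (String × List String) :=
  ((PySem.Dict.mk f).getD "framework_refs" ([] : List (String × List String)))

def stepA (summary : PySem.Dict String (List String)) (p : String × List String) :
    PySem.Dict String (List String) :=
  let summary := PySem.Dict.setdefault summary p.1 []
  p.2.foldl (fun summary ctrl =>
    if (summary.getD p.1 []).contains ctrl then summary
    else summary.insert p.1 (summary.getD p.1 [] ++ [ctrl])) summary

def stepB (collected : PySem.Dict String (List String)) (p : String × List String) :
    PySem.Dict String (List String) :=
  match collected.get? p.1 with
  | some v => collected.insert p.1 (v ++ p.2)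
  | none   => collected.insert p.1 p.2

-- value-wise dedup image of a dict (the raw collector mapped to A's state)
def mapDedup (d : PySem.Dict String (List String)) : PySem.Dict String (List String) :=
  PySem.Dict.mk (d.items.map (fun p => (p.1, PySem.List.dedup p.2)))

-- the flat (framework, control) pair stream of a chunk list
def pairsOf (L : List (String × List String)) : List (String × String) :=
  L.flatMap (fun p => p.2.map (fun c => (p.1, c)))

lemma keys_mapDedup (d : PySem.Dict String (List String)) : (mapDedup d).keys = d.keys := by
  simp [mapDedup, PySem.Dict.keys, List.map_map, Function.comp]

lemma get?_mapDedup (d : PySem.Dict String (List String)) (k : String) :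
    (mapDedup d).get? k = (d.get? k).map PySem.List.dedup := by
  obtain ⟨l⟩ := d
  induction l with
  | nil => simp [mapDedup, PySem.Dict.get?]
  | cons q t ih =>
      by_cases h : q.1 == k
      · simp [mapDedup, PySem.Dict.get?, List.find?, h]
      · simpa [mapDedup, PySem.Dict.get?, List.find?, h] using ih

lemma contains_mapDedup (d : PySem.Dict String (List String)) (k : String) :
    (mapDedup d).contains k = d.contains k := by
  rw [PySem.Dict.contains_eq_isSome_get?, PySem.Dict.contains_eq_isSome_get?, get?_mapDedup]
  cases d.get? k <;> simp

lemma insert_mapDedup (d : PySem.Dict String (List String)) (k : String) (v : List String) :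
    mapDedup (d.insert k v) = (mapDedup d).insert k (PySem.List.dedup v) := by
  apply PySem.Dict.ext
  simp only [PySem.Dict.insert, contains_mapDedup]
  by_cases h : d.contains k = true
  · simp only [h, if_true, mapDedup, List.map_map]
    apply List.map_congr_left
    intro p _
    by_cases hp : p.1 == k <;> simp [Function.comp, hp]
  · simp [h, mapDedup]

lemma insert_insert_self (d : PySem.Dict String (List String)) (k : String)
    (a b : List String) : (d.insert k a).insert k b = d.insert k b := by
  have h2 : (d.insert k a).contains k = true := PySem.Dict.contains_insert_self d k a
  apply PySem.Dict.ext
  rw [PySem.Dict.items_insert_of_contains _ b h2]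
  by_cases h : d.contains k = true
  · rw [PySem.Dict.items_insert_of_contains _ a h, PySem.Dict.items_insert_of_contains _ b h,
      List.map_map]
    apply List.map_congr_left
    intro p _
    by_cases hp : p.1 == k <;> simp [Function.comp, hp]
  · rw [PySem.Dict.items_insert_of_not_contains _ a (by simpa using h),
      PySem.Dict.items_insert_of_not_contains _ b (by simpa using h)]
    have hall : ∀ p ∈ d.items, (p.1 == k) = false := by
      intro p hp
      by_contra hc
      have hck : d.contains k = true := by
        simp only [PySem.Dict.contains, List.any_eq_true]
        exact ⟨p, hp, by simpa using hc⟩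
      exact h hck
    rw [List.map_append]
    have hid : d.items.map (fun p => if (p.1 == k) = true then (k, b) else p) = d.items := by
      have := List.map_congr_left (l := d.items)
        (f := fun p => if (p.1 == k) = true then (k, b) else p) (g := id)
        (by intro p hp; simp [hall p hp])
      simpa using this
    rw [hid]
    simp

lemma insert_self_of_get? (d : PySem.Dict String (List String)) (k : String) (v : List String)
    (hnd : d.keys.Nodup) (h : d.get? k = some v) : d.insert k v = d := by
  have hc : d.contains k = true := by
    rw [PySem.Dict.contains_eq_isSome_get?, h]; rfl
  apply PySem.Dict.ext
  rw [PySem.Dict.items_insert_of_contains _ v hc]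
  have := List.map_congr_left (l := d.items)
    (f := fun p => if (p.1 == k) = true then (k, v) else p) (g := id)
    (by
      intro p hp
      by_cases hpk : (p.1 == k) = true
      · have hk : p.1 = k := by simpa using hpk
        have hget : d.get? p.1 = some p.2 :=
          PySem.Dict.get?_of_mem_items d (by simpa using hp) hnd
        rw [hk, h] at hget
        have hv : p.2 = v := (Option.some.inj hget).symm
        simp [← hk, ← hv]
      · simp [hpk])
  simpa using this

lemma dedup_foldl_add (v ctrls : List String) :
    ctrls.foldl PySem.Set.add (PySem.List.dedup v) = PySem.List.dedup (v ++ ctrls) := by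
  simp [PySem.List.dedup_eq_ofList, PySem.Set.ofList_eq_foldl, List.foldl_append]

lemma innerA (fw : String) : ∀ (ctrls : List String) (s : PySem.Dict String (List String))
    (v : List String), s.keys.Nodup → s.get? fw = some v →
    ctrls.foldl (fun s c =>
        if (s.getD fw []).contains c then s
        else s.insert fw (s.getD fw [] ++ [c])) s
      = s.insert fw (ctrls.foldl PySem.Set.add v) := by
  intro ctrls
  induction ctrls with
  | nil => intro s v hnd h; simpa using (insert_self_of_get? s fw v hnd h).symm
  | cons c cs ih =>
      intro s v hnd h
      have hg : s.getD fw [] = v := PySem.Dict.getD_of_get?_eq_some s [] h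
      by_cases hv : v.contains c = true
      · simp only [List.foldl_cons, hg, hv, if_true]
        rw [ih s v hnd h]
        have hm : c ∈ v := by simpa using hv
        simp [PySem.Set.add, hm]
      · simp only [List.foldl_cons, hg, hv, if_false, Bool.false_eq_true]
        rw [ih (s.insert fw (v ++ [c])) (v ++ [c])
              (PySem.Dict.nodup_keys_insert s fw (v ++ [c]) hnd)
              (PySem.Dict.get?_insert_self s fw (v ++ [c]))]
        rw [insert_insert_self]
        have hm : c ∉ v := by simpa using hv
        simp [PySem.Set.add, hm]

lemma stepA_mapDedup (b : PySem.Dict String (List String)) (p : String × List String)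
    (hnd : b.keys.Nodup) : stepA (mapDedup b) p = mapDedup (stepB b p) := by
  cases hb : b.get? p.1 with
  | some v =>
      have hc : b.contains p.1 = true := by
        rw [PySem.Dict.contains_eq_isSome_get?, hb]; rfl
      have hsd : PySem.Dict.setdefault (mapDedup b) p.1 [] = mapDedup b := by
        simp [PySem.Dict.setdefault, contains_mapDedup, hc]
      unfold stepA stepB
      rw [hb]
      simp only [hsd]
      rw [innerA p.1 p.2 (mapDedup b) (PySem.List.dedup v)
            (by rw [keys_mapDedup]; exact hnd)
            (by rw [get?_mapDedup, hb]; rfl)]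
      rw [dedup_foldl_add, insert_mapDedup]
  | none =>
      have hc : b.contains p.1 = false := (PySem.Dict.get?_eq_none_iff_contains b p.1).mp hb
      have hins : PySem.Dict.setdefault (mapDedup b) p.1 [] = mapDedup (b.insert p.1 []) := by
        rw [insert_mapDedup]
        simp [PySem.Dict.setdefault, PySem.Dict.insert, contains_mapDedup, hc]
      unfold stepA stepB
      rw [hb]
      simp only [hins]
      rw [innerA p.1 p.2 (mapDedup (b.insert p.1 [])) ([])
            (by rw [keys_mapDedup]; exact PySem.Dict.nodup_keys_insert b p.1 [] hnd)
            (by rw [get?_mapDedup, PySem.Dict.get?_insert_self]; rfl)]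
      have : p.2.foldl PySem.Set.add [] = PySem.List.dedup p.2 := by
        simp [PySem.List.dedup_eq_ofList, PySem.Set.ofList_eq_foldl]
      rw [this, ← insert_mapDedup, insert_insert_self]

lemma nodup_stepB (b : PySem.Dict String (List String)) (p : String × List String)
    (hnd : b.keys.Nodup) : (stepB b p).keys.Nodup := by
  unfold stepB
  cases b.get? p.1 <;> exact PySem.Dict.nodup_keys_insert _ _ _ hnd

lemma inner_fold (l : List (String × List String)) : ∀ (b : PySem.Dict String (List String)),
    b.keys.Nodup →
    l.foldl stepA (mapDedup b) = mapDedup (l.foldl stepB b) ∧ (l.foldl stepB b).keys.Nodup := by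
  induction l with
  | nil => intro b hnd; exact ⟨rfl, hnd⟩
  | cons p t ih =>
      intro b hnd
      simp only [List.foldl_cons]
      rw [stepA_mapDedup b p hnd]
      exact ih (stepB b p) (nodup_stepB b p hnd)

lemma outer_fold (fs : List (List (String × List (String × List String)))) :
    ∀ (b : PySem.Dict String (List String)), b.keys.Nodup →
    fs.foldl (fun s f => (frefs f).foldl stepA s) (mapDedup b)
      = mapDedup (fs.foldl (fun s f => (frefs f).foldl stepB s) b)
    ∧ (fs.foldl (fun s f => (frefs f).foldl stepB s) b).keys.Nodup := by
  induction fs with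
  | nil => intro b hnd; exact ⟨rfl, hnd⟩
  | cons f t ih =>
      intro b hnd
      simp only [List.foldl_cons]
      obtain ⟨h1, h2⟩ := inner_fold (frefs f) b hnd
      rw [h1]
      exact ih _ h2

-- B's collector fold over chunks equals the grouped form of the flat pair stream
lemma fold_chunks (fs : List (List (String × List (String × List String))))
    (d : PySem.Dict String (List String)) :
    fs.foldl (fun s f => (frefs f).foldl stepB s) d = (fs.flatMap frefs).foldl stepB d := by
  induction fs generalizing d with
  | nil => rfl
  | cons f t ih => simp [List.foldl_append, ih]

lemma dedup_append_singleton {α : Type} [BEq α] [LawfulBEq α] (l : List α) (x : α) :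
    PySem.List.dedup (l ++ [x])
      = if x ∈ l then PySem.List.dedup l else PySem.List.dedup l ++ [x] := by
  rw [PySem.List.dedup_eq_ofList, PySem.List.dedup_eq_ofList,
    PySem.Set.ofList_eq_foldl, PySem.Set.ofList_eq_foldl, List.foldl_append]
  rw [List.foldl_cons, List.foldl_nil]
  rw [show (l.foldl PySem.Set.add []) = PySem.Set.ofList l from (PySem.Set.ofList_eq_foldl l).symm]
  by_cases h : x ∈ l
  · simp [PySem.Set.add, h]
  · simp [PySem.Set.add, h]

lemma pairs_fst_mem (L : List (String × List String)) (q : String × String)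
    (h : q ∈ pairsOf L) : q.1 ∈ L.map Prod.fst := by
  simp only [pairsOf, List.mem_flatMap] at h
  obtain ⟨p, hp, hq⟩ := h
  simp only [List.mem_map] at hq
  obtain ⟨c, _, rfl⟩ := hq
  exact List.mem_map.mpr ⟨p, hp, rfl⟩

lemma grp : ∀ L : List (String × List String),
    (L.foldl stepB PySem.Dict.empty).items
      = (PySem.List.dedup (L.map Prod.fst)).map
          (fun fw => (fw, ((pairsOf L).filter (fun q => q.1 == fw)).map Prod.snd)) := by
  intro L
  induction L using List.reverseRecOn with
  | nil => rfl
  | append_singleton L c ih =>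
      rw [List.foldl_append, List.foldl_cons, List.foldl_nil]
      set D := L.foldl stepB PySem.Dict.empty with hD
      have hkeys : D.keys = PySem.List.dedup (L.map Prod.fst) := by
        simp [PySem.Dict.keys, ih, List.map_map, Function.comp_def]
      have hnd : D.keys.Nodup := by
        rw [hkeys]; exact PySem.List.nodup_dedup _
      have hmapfst : (L ++ [c]).map Prod.fst = L.map Prod.fst ++ [c.1] := by simp
      have hpairs : pairsOf (L ++ [c]) = pairsOf L ++ c.2.map (fun x => (c.1, x)) := by
        simp [pairsOf]
      have hnewfil : ∀ fw : String, (c.2.map (fun x => (c.1, x))).filter (fun q => q.1 == fw)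
          = if c.1 = fw then c.2.map (fun x => (c.1, x)) else [] := by
        intro fw
        rw [List.filter_map]
        by_cases hfw : c.1 = fw
        · subst hfw
          simp [Function.comp_def]
        · simp [Function.comp_def, hfw]
      by_cases hmem : c.1 ∈ L.map Prod.fst
      · -- framework already present: in-place update
        have hitem : (c.1, ((pairsOf L).filter (fun q => q.1 == c.1)).map Prod.snd) ∈ D.items := by
          rw [ih]
          exact List.mem_map.mpr ⟨c.1, (PySem.List.mem_dedup _ _).mpr hmem, rfl⟩
        have hget : D.get? c.1 = some (((pairsOf L).filter (fun q => q.1 == c.1)).map Prod.snd) :=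
          PySem.Dict.get?_of_mem_items D hitem hnd
        have hcont : D.contains c.1 = true := by
          rw [PySem.Dict.contains_eq_isSome_get?, hget]; rfl
        rw [show stepB D c = D.insert c.1
              ((((pairsOf L).filter (fun q => q.1 == c.1)).map Prod.snd) ++ c.2) by
            unfold stepB; rw [hget]]
        rw [PySem.Dict.items_insert_of_contains _ _ hcont, ih, List.map_map]
        rw [hmapfst, dedup_append_singleton, if_pos hmem]
        apply List.map_congr_left
        intro fw hfw
        simp only [Function.comp_def]
        by_cases hfwc : fw = c.1
        · have hbe : (fw == c.1) = true := by simpa using hfwc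
          rw [if_pos hbe, hpairs, List.filter_append, List.map_append,
            hnewfil fw, if_pos hfwc.symm]
          rw [hfwc]
          simp
        · have hne : (fw == c.1) = false := by simpa using hfwc
          rw [if_neg (by simp [hne]), hpairs, List.filter_append,
            hnewfil fw, if_neg (fun h => hfwc h.symm)]
          simp
      · -- new framework: appended at the end
        have hcont : D.contains c.1 = false := by
          by_contra hc
          have hc' : D.contains c.1 = true := by
            cases h : D.contains c.1 with
            | true => rfl
            | false => exact absurd h hc
          simp only [PySem.Dict.contains, List.any_eq_true] at hc'
          obtain ⟨p, hp, hpe⟩ := hc'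
          have : p.1 ∈ D.items.map Prod.fst := List.mem_map.mpr ⟨p, hp, rfl⟩
          rw [ih, List.map_map] at this
          have : p.1 ∈ PySem.List.dedup (L.map Prod.fst) := by
            simpa [Function.comp] using this
          have hmemL : p.1 ∈ L.map Prod.fst := (PySem.List.mem_dedup _ _).mp this
          have : p.1 = c.1 := by simpa using hpe
          exact hmem (this ▸ hmemL)
        have hget : D.get? c.1 = none := (PySem.Dict.get?_eq_none_iff_contains D c.1).mpr hcont
        rw [show stepB D c = D.insert c.1 c.2 by unfold stepB; rw [hget]]
        rw [PySem.Dict.items_insert_of_not_contains _ _ (by simp [hcont]), ih]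
        rw [hmapfst, dedup_append_singleton, if_neg hmem, List.map_append]
        congr 1
        · apply List.map_congr_left
          intro fw hfw
          have hfwL : fw ∈ L.map Prod.fst := (PySem.List.mem_dedup _ _).mp hfw
          have hfwc : fw ≠ c.1 := fun h => hmem (h ▸ hfwL)
          rw [hpairs, List.filter_append, hnewfil fw, if_neg (fun h => hfwc h.symm)]
          simp
        · have hold : (pairsOf L).filter (fun q => q.1 == c.1) = [] := by
            apply List.filter_eq_nil_iff.mpr
            intro q hq
            have hm2 : q.1 ∈ L.map Prod.fst := pairs_fst_mem L q hq
            simp only [beq_iff_eq]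
            exact fun h => hmem (h ▸ hm2)
          simp only [List.map_cons, List.map_nil]
          rw [hpairs, List.filter_append, List.map_append, hold, hnewfil c.1, if_pos rfl]
          simp

-- first-occurrence dedup, recursively, and its agreement with PySem.List.dedup
def dF {α : Type} [BEq α] : List α → List α
  | [] => []
  | a :: t => a :: dF (t.filter (fun x => !(x == a)))
termination_by l => l.length
decreasing_by simpa using Nat.lt_succ_of_le (le_trans (List.length_filter_le _ _) (by simp))

lemma dF_nil {α : Type} [BEq α] : dF ([] : List α) = [] := by rw [dF]

lemma dF_cons {α : Type} [BEq α] (a : α) (t : List α) :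
    dF (a :: t) = a :: dF (t.filter (fun x => !(x == a))) := by rw [dF]

lemma foldl_add_acc {α : Type} [BEq α] [LawfulBEq α] :
    ∀ (l : List α) (s : List α), l.foldl PySem.Set.add s = s ++ dF (l.filter (fun x => !(List.contains s x))) := by
  intro l
  induction l with
  | nil => intro s; simp [dF]
  | cons a t ih =>
      intro s
      rw [List.foldl_cons]
      by_cases h : a ∈ s
      · have ha : PySem.Set.add s a = s := by simp [PySem.Set.add, PySem.Set.contains, h]
        rw [ha, ih s]
        simp [h]
      · have ha : PySem.Set.add s a = s ++ [a] := by simp [PySem.Set.add, PySem.Set.contains, h]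
        rw [ha, ih (s ++ [a])]
        have hf : t.filter (fun x => !(List.contains (s ++ [a]) x))
            = (t.filter (fun x => !(List.contains s x))).filter (fun x => !(x == a)) := by
          rw [List.filter_filter]
          apply List.filter_congr
          intro x _
          by_cases hx : x ∈ s <;> by_cases hxa : x = a <;> simp [hx, hxa]
        rw [hf]
        simp [h, dF]

lemma dedup_eq_dF {α : Type} [BEq α] [LawfulBEq α] (l : List α) : PySem.List.dedup l = dF l := by
  rw [PySem.List.dedup_eq_ofList, PySem.Set.ofList_eq_foldl, foldl_add_acc l []]
  simp

lemma dF_filter_aux {α : Type} [BEq α] [LawfulBEq α] (q : α → Bool) :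
    ∀ (n : Nat) (l : List α), l.length ≤ n → (dF l).filter q = dF (l.filter q) := by
  intro n
  induction n with
  | zero =>
      intro l hl
      rw [List.length_eq_zero_iff.mp (Nat.le_zero.mp hl)]
      simp [dF_nil]
  | succ n ih =>
      intro l hl
      cases l with
      | nil => simp [dF_nil]
      | cons a t =>
          have ht : t.length ≤ n := Nat.le_of_succ_le_succ hl
          have htf : (t.filter (fun x => !(x == a))).length ≤ n :=
            le_trans (List.length_filter_le _ _) ht
          rw [dF_cons]
          by_cases hq : q a = true
          · rw [List.filter_cons_of_pos hq, ih _ htf]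
            have hsw : (t.filter (fun x => !(x == a))).filter q
                = (t.filter q).filter (fun x => !(x == a)) := by
              rw [List.filter_filter, List.filter_filter]
              exact List.filter_congr (fun x _ => Bool.and_comm _ _)
            rw [hsw, List.filter_cons_of_pos hq, dF_cons]
          · have hra : List.filter q (a :: t) = List.filter q t :=
              List.filter_cons_of_neg (by simp [hq])
            rw [hra, List.filter_cons_of_neg (by simp [hq]), ih _ htf]
            have hsw : (t.filter (fun x => !(x == a))).filter q
                = (t.filter q).filter (fun x => !(x == a)) := by
              rw [List.filter_filter, List.filter_filter]
              exact List.filter_congr (fun x _ => Bool.and_comm _ _)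
            rw [hsw]
            congr 1
            apply List.filter_eq_self.mpr
            intro x hx
            have hqx : q x = true := List.of_mem_filter hx
            have : x ≠ a := fun he => by rw [he] at hqx; exact absurd hqx (by simp [hq])
            simpa using this

lemma dF_filter {α : Type} [BEq α] [LawfulBEq α] (q : α → Bool) (l : List α) :
    (dF l).filter q = dF (l.filter q) :=
  dF_filter_aux q l.length l le_rfl

lemma dF_map_snd_aux (fw : String) :
    ∀ (n : Nat) (l : List (String × String)), l.length ≤ n → (∀ p ∈ l, p.1 = fw) →
      (dF l).map Prod.snd = dF (l.map Prod.snd) := by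
  intro n
  induction n with
  | zero =>
      intro l hl _
      rw [List.length_eq_zero_iff.mp (Nat.le_zero.mp hl)]
      simp [dF_nil]
  | succ n ih =>
      intro l hl hall
      cases l with
      | nil => simp [dF_nil]
      | cons p t =>
          have ht : t.length ≤ n := Nat.le_of_succ_le_succ hl
          rw [dF_cons, List.map_cons, List.map_cons, dF_cons]
          congr 1
          rw [ih (t.filter (fun x => !(x == p)))
                (le_trans (List.length_filter_le _ _) ht)
                (fun q hq => hall q (List.mem_cons_of_mem _ (List.mem_of_mem_filter hq)))]
          congr 1
          rw [List.filter_map]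
          congr 1
          apply List.filter_congr
          intro x hx
          have hx1 : x.1 = fw := hall x (List.mem_cons_of_mem _ hx)
          have hp1 : p.1 = fw := hall p List.mem_cons_self
          simp only [Function.comp]
          by_cases he : x = p
          · simp [he]
          · have : x.2 ≠ p.2 := by
              intro h2
              exact he (Prod.ext (hx1.trans hp1.symm) h2)
            simp [he, this]

lemma dF_map_snd (fw : String) (l : List (String × String)) (h : ∀ p ∈ l, p.1 = fw) :
    (dF l).map Prod.snd = dF (l.map Prod.snd) :=
  dF_map_snd_aux fw l.length l le_rfl h

lemma value_eq (pairs : List (String × String)) (fw : String) :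
    PySem.List.dedup ((pairs.filter (fun q => q.1 == fw)).map Prod.snd)
      = ((PySem.List.dedup pairs).filter (fun q => q.1 == fw)).map Prod.snd := by
  rw [dedup_eq_dF, dedup_eq_dF]
  rw [← dF_map_snd fw (pairs.filter (fun q => q.1 == fw))
        (fun p hp => by simpa using List.of_mem_filter hp)]
  rw [dF_filter]

-- ===== VERDICT (by name: the statement is the Claim_ definition above) =====
theorem framework_summary_spec : Claim_equal_framework_summary := by
  intro xs _
  unfold Spec_framework_summary framework_summary framework_summary_alt
  have h := (outer_fold xs PySem.Dict.empty PySem.Dict.nodup_keys_empty).1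
  have he : mapDedup PySem.Dict.empty = PySem.Dict.empty := rfl
  rw [he] at h
  show (xs.foldl (fun s f => (frefs f).foldl stepA s) PySem.Dict.empty).items = _
  rw [h]
  show ((xs.foldl (fun s f => (frefs f).foldl stepB s) PySem.Dict.empty).items.map
      (fun p => (p.1, PySem.List.dedup p.2))) = _
  rw [fold_chunks, grp, List.map_map]
  rw [show (xs.flatMap (fun f =>
        ((PySem.Dict.mk f).getD "framework_refs" ([] : List (String × List String))).map Prod.fst))
      = (xs.flatMap frefs).map Prod.fst by rw [List.map_flatMap]; rfl]
  rw [show (xs.flatMap (fun f =>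
        ((PySem.Dict.mk f).getD "framework_refs" ([] : List (String × List String))).flatMap
          (fun p => p.2.map (fun c => (p.1, c)))))
      = pairsOf (xs.flatMap frefs) by rw [pairsOf, List.flatMap_assoc]; rfl]
  apply List.map_congr_left
  intro fw _
  simp only [Function.comp_def]
  rw [value_eq]
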